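-- pv_equiv track=rewrite | github.com/shirazidev/Random-Py-Projects | جمع اعداد.py | gen_ep
-- ===== SOURCE A (Python) =====
-- def gen_ep(inpexp):
--     ones = []
--     twos = []
--     threes = []
--
--     for soma in inpexp.split('+'):
--         if soma == '1':
--             ones.append('1')
--         elif soma == '2':
--             twos.append('2')
--         elif soma == '3':
--             threes.append('3')
--
--     combined = []
--     combined.extend(ones)
--     combined.extend(twos)
--     combined.extend(threes)
--
--     exp = '+'.join(combined)
--     return exp
-- ===== SOURCE B (Python) =====
-- def gen_ep(inpexp):
--     return '+'.join(sorted(t for t in inpexp.split('+') if t in ('1', '2', '3')))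
-- ===== Notes on version B (the rewrite author's own statement) =====
-- stated objective: simpler
-- what changed: Replaces the three bucket lists and their concatenation with one expression: filter the '+'-split tokens to {'1','2','3'} and hand them to sorted() before joining.
import Mathlib
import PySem

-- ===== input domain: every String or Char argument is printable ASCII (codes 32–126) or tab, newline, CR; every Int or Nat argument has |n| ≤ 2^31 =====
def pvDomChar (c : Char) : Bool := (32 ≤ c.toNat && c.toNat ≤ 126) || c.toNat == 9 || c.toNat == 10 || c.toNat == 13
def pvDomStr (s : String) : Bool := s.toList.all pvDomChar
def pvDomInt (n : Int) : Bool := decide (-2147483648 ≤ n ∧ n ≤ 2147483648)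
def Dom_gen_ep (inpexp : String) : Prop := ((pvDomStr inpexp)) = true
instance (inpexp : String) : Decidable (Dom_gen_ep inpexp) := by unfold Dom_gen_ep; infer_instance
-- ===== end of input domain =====

-- B replaces A's three bucket lists with filter-then-sorted in one expression (simpler).

-- ===== PORT A =====
-- A's loop over the split tokens, appending into the three bucket lists
def gen_ep_loop (toks : List String) (ones twos threes : List String) :
    List String × List String × List String :=
  match toks with
  | [] => (ones, twos, threes)
  | soma :: rest =>
    if soma == "1" then gen_ep_loop rest (ones ++ ["1"]) twos threes
    else if soma == "2" then gen_ep_loop rest ones (twos ++ ["2"]) threes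
    else if soma == "3" then gen_ep_loop rest ones twos (threes ++ ["3"])
    else gen_ep_loop rest ones twos threes

def gen_ep (inpexp : String) : String :=
  let r := gen_ep_loop ((PySem.Str.split? inpexp "+").getD []) [] [] []
  let combined := r.1 ++ r.2.1 ++ r.2.2
  PySem.Str.join "+" combined

-- ===== PORT B =====
def gen_ep_alt (inpexp : String) : String :=
  PySem.Str.join "+"
    (PySem.List.sorted
      (((PySem.Str.split? inpexp "+").getD []).filter
        (fun t => t == "1" || t == "2" || t == "3"))
      (fun x => x) false)

-- ===== PRECONDITION & SPEC =====
def Spec_gen_ep (inpexp : String) (out : String) : Prop := out = gen_ep_alt inpexp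
instance (inpexp : String) (out : String) : Decidable (Spec_gen_ep inpexp out) := by unfold Spec_gen_ep; infer_instance

-- ===== CLAIM (what is proved, stated in full; the proofs are below) =====
def Claim_equal_gen_ep : Prop := ∀ (inpexp : String), Dom_gen_ep inpexp → Spec_gen_ep inpexp (gen_ep inpexp)

-- ===== LEMMAS AND PROOFS =====

-- A's loop just accumulates the three single-token filters onto the buckets.
theorem gen_ep_loop_eq (toks : List String) (ones twos threes : List String) :
    gen_ep_loop toks ones twos threes =
      (ones ++ toks.filter (fun t => t == "1"),
       twos ++ toks.filter (fun t => t == "2"),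
       threes ++ toks.filter (fun t => t == "3")) := by
  induction toks generalizing ones twos threes with
  | nil => simp [gen_ep_loop]
  | cons soma rest ih =>
    by_cases h1 : soma = "1"
    · subst h1; simp [gen_ep_loop, ih]
    · by_cases h2 : soma = "2"
      · subst h2; simp [gen_ep_loop, ih]
      · by_cases h3 : soma = "3"
        · subst h3; simp [gen_ep_loop, ih]
        · simp [gen_ep_loop, h1, h2, h3, ih]

-- the combined filter is a permutation of the three single filters concatenated
theorem filter_perm (l : List String) :
    (l.filter (fun t => t == "1" || t == "2" || t == "3")).Perm
      (l.filter (fun t => t == "1") ++ l.filter (fun t => t == "2") ++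
       l.filter (fun t => t == "3")) := by
  induction l with
  | nil => simp
  | cons x xs ih =>
    by_cases h1 : x = "1"
    · subst h1; simpa [List.filter_cons] using ih.cons "1"
    · by_cases h2 : x = "2"
      · subst h2
        simp only [List.filter_cons]
        refine List.Perm.trans (ih.cons "2") ?_
        simpa [List.append_assoc] using
          (List.perm_middle (a := "2") (l₁ := xs.filter (fun t => t == "1"))
            (l₂ := xs.filter (fun t => t == "2") ++ xs.filter (fun t => t == "3"))).symm
      · by_cases h3 : x = "3"
        · subst h3
          simp only [List.filter_cons]
          refine List.Perm.trans (ih.cons "3") ?_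
          simpa [List.append_assoc] using
            (List.perm_middle (a := "3")
              (l₁ := xs.filter (fun t => t == "1") ++ xs.filter (fun t => t == "2"))
              (l₂ := xs.filter (fun t => t == "3"))).symm
        · simpa [List.filter_cons, h1, h2, h3] using ih

-- a list all of whose elements are a constant is pairwise ≤
theorem pairwise_const_le (l : List String) (c : String) (h : ∀ x ∈ l, x = c) :
    l.Pairwise (· ≤ ·) :=
  List.Pairwise.imp_of_mem (by intro a b ha hb _; rw [h a ha, h b hb])
    (List.pairwise_of_forall_mem_list (fun a _ b _ => trivial))

-- the concatenation of the three buckets is sorted (pairwise ≤)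
theorem buckets_pairwise (l : List String) :
    (l.filter (fun t => t == "1") ++ l.filter (fun t => t == "2") ++
     l.filter (fun t => t == "3")).Pairwise (· ≤ ·) := by
  have m1 : ∀ x ∈ l.filter (fun t => t == "1"), x = "1" := by
    intro x hx; simpa using (List.of_mem_filter hx)
  have m2 : ∀ x ∈ l.filter (fun t => t == "2"), x = "2" := by
    intro x hx; simpa using (List.of_mem_filter hx)
  have m3 : ∀ x ∈ l.filter (fun t => t == "3"), x = "3" := by
    intro x hx; simpa using (List.of_mem_filter hx)
  have h12 : ("1" : String) ≤ "2" := by rw [String.le_iff_toList_le]; decide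
  have h13 : ("1" : String) ≤ "3" := by rw [String.le_iff_toList_le]; decide
  have h23 : ("2" : String) ≤ "3" := by rw [String.le_iff_toList_le]; decide
  rw [List.pairwise_append]
  refine ⟨?_, pairwise_const_le _ _ m3, ?_⟩
  · rw [List.pairwise_append]
    refine ⟨pairwise_const_le _ _ m1, pairwise_const_le _ _ m2, ?_⟩
    intro a ha b hb; rw [m1 a ha, m2 b hb]; exact h12
  · intro a ha b hb
    rw [m3 b hb]
    rcases List.mem_append.mp ha with h | h
    · rw [m1 a h]; exact h13
    · rw [m2 a h]; exact h23

-- ===== VERDICT (by name: the statement is the Claim_ definition above) =====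
theorem gen_ep_spec : Claim_equal_gen_ep := by
  intro inpexp _
  unfold Spec_gen_ep gen_ep gen_ep_alt
  rw [gen_ep_loop_eq]
  simp only [List.nil_append]
  congr 1
  exact (PySem.List.sorted_id_eq_of_perm_of_pairwise _ _
    (filter_perm _).symm (buckets_pairwise _)).symm
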